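-- pv_equiv track=rewrite | github.com/weichert/squadvault | scripts/_patch_docs_ci_guardrails_index_toc_and_reorder_v3.py | _strip_duplicate_sections
-- ===== SOURCE A (Python) =====
-- from typing import Dict, List, Tuple, Optional
--
-- def _heading_key(heading_line: str) -> str:
--     h = heading_line.strip()
--     if h.startswith("##"):
--         h = h[2:].strip()
--     return h.lower()
--
-- def _strip_duplicate_sections(
--     sections: List[Tuple[str, str]],
-- ) -> tuple[List[Tuple[str, str]], Optional[Tuple[str, str]], Optional[Tuple[str, str]]]:
--     """
--     Remove ALL occurrences of top-level:
--       - ## Contents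
--       - ## How to Read This Index
--
--     Return: (filtered_sections, last_contents_block, last_how_block)
--     (We keep the *last* seen bodies only as a fallback; we will reinsert canonical bodies anyway.)
--     """
--     filtered: List[Tuple[str, str]] = []
--     last_contents: Optional[Tuple[str, str]] = None
--     last_how: Optional[Tuple[str, str]] = None
--
--     for h, b in sections:
--         k = _heading_key(h)
--         if k == "contents":
--             last_contents = (h, b)
--             continue
--         if k == "how to read this index":
--             last_how = (h, b)
--             continue
--         filtered.append((h, b))
--
--     return filtered, last_contents, last_how
-- ===== SOURCE B (Python) =====
-- from typing import List, Tuple, Optional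
--
-- def _heading_key(heading_line: str) -> str:
--     h = heading_line.strip()
--     if h.startswith("##"):
--         h = h[2:].strip()
--     return h.lower()
--
-- def _strip_duplicate_sections(
--     sections: List[Tuple[str, str]],
-- ) -> tuple[List[Tuple[str, str]], Optional[Tuple[str, str]], Optional[Tuple[str, str]]]:
--     filtered = [(h, b) for h, b in sections
--                 if _heading_key(h) not in ("contents", "how to read this index")]
--     last_contents = next((p for p in reversed(sections)
--                           if _heading_key(p[0]) == "contents"), None)
--     last_how = next((p for p in reversed(sections)
--                      if _heading_key(p[0]) == "how to read this index"), None)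
--     return filtered, last_contents, last_how
-- ===== Notes on version B (the rewrite author's own statement) =====
-- stated objective: alternative
-- what changed: Replaces the single accumulating loop (mutable filtered/last_contents/last_how state) with three independent traversals: a filtering comprehension plus two reverse-scan first-match lookups for the last occurrences.
import Mathlib
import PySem

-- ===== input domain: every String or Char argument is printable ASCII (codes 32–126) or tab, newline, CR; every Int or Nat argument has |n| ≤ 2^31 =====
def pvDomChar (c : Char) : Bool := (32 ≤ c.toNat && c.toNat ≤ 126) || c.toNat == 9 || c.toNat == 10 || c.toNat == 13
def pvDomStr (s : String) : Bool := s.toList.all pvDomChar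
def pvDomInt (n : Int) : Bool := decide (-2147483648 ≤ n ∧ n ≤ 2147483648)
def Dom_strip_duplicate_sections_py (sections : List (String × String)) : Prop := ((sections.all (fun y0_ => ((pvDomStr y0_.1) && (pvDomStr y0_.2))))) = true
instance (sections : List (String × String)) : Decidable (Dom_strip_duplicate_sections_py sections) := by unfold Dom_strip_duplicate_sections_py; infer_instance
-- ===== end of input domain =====

-- B replaces A's single accumulating loop with three independent traversals (filter + two reverse-scan lookups); same values, alternative decomposition.
-- ===== PORT A =====
def heading_key (heading_line : String) : String :=
  let h := PySem.Str.strip heading_line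
  let h := if PySem.Str.startswith h "##" then PySem.Str.strip (PySem.Str.slice h (some 2) none) else h
  PySem.Str.lower h

def strip_duplicate_sections_py (sections : List (String × String)) : (List (String × String)) × (Option (String × String)) × (Option (String × String)) :=
  sections.foldl
    (fun st hb =>
      let k := heading_key hb.1
      if k = "contents" then (st.1, some hb, st.2.2)
      else if k = "how to read this index" then (st.1, st.2.1, some hb)
      else (st.1 ++ [hb], st.2.1, st.2.2))
    ([], none, none)

-- ===== PORT B =====
def strip_duplicate_sections_py_alt (sections : List (String × String)) : (List (String × String)) × (Option (String × String)) × (Option (String × String)) :=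
  (sections.filter (fun hb => heading_key hb.1 != "contents" && heading_key hb.1 != "how to read this index"),
   sections.reverse.find? (fun hb => heading_key hb.1 == "contents"),
   sections.reverse.find? (fun hb => heading_key hb.1 == "how to read this index"))

-- ===== PRECONDITION & SPEC =====
def Spec_strip_duplicate_sections_py (sections : List (String × String)) (out : (List (String × String)) × (Option (String × String)) × (Option (String × String))) : Prop := out = strip_duplicate_sections_py_alt sections
instance (sections : List (String × String)) (out : (List (String × String)) × (Option (String × String)) × (Option (String × String))) : Decidable (Spec_strip_duplicate_sections_py sections out) := by unfold Spec_strip_duplicate_sections_py; infer_instance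

-- ===== CLAIM =====
def Claim_equal_strip_duplicate_sections_py : Prop := ∀ (sections : List (String × String)), Dom_strip_duplicate_sections_py sections → Spec_strip_duplicate_sections_py sections (strip_duplicate_sections_py sections)

-- ===== LEMMAS AND PROOFS =====
-- Characterisation of A's fold with a general accumulator: the filtered part is appended
-- filter-wise, and each "last seen" slot is the first reverse match, falling back to the old slot.
theorem strip_fold_char (l : List (String × String))
    (acc : List (String × String)) (c h : Option (String × String)) :
    l.foldl
      (fun st hb =>
        let k := heading_key hb.1
        if k = "contents" then (st.1, some hb, st.2.2)
        else if k = "how to read this index" then (st.1, st.2.1, some hb)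
        else (st.1 ++ [hb], st.2.1, st.2.2))
      (acc, c, h)
    = (acc ++ l.filter (fun hb => heading_key hb.1 != "contents" && heading_key hb.1 != "how to read this index"),
       (l.reverse.find? (fun hb => heading_key hb.1 == "contents")).or c,
       (l.reverse.find? (fun hb => heading_key hb.1 == "how to read this index")).or h) := by
  induction l generalizing acc c h with
  | nil => simp
  | cons x xs ih =>
    simp only [List.foldl_cons, List.filter_cons, List.reverse_cons, List.find?_append]
    by_cases hc : heading_key x.1 = "contents"
    · simp only [hc, ih]
      cases xs.reverse.find? (fun hb => heading_key hb.1 == "contents") <;> simp [hc]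
    · by_cases hh : heading_key x.1 = "how to read this index"
      · simp only [hh, if_neg hc, ih]
        cases xs.reverse.find? (fun hb => heading_key hb.1 == "how to read this index") <;>
          simp [hh]
      · simp only [if_neg hc, if_neg hh, ih]
        cases hcf : xs.reverse.find? (fun hb => heading_key hb.1 == "contents") <;>
        cases hhf : xs.reverse.find? (fun hb => heading_key hb.1 == "how to read this index") <;>
          simp [hc, hh]

-- ===== VERDICT =====
theorem strip_duplicate_sections_py_spec : Claim_equal_strip_duplicate_sections_py := by
  intro sections _
  unfold Spec_strip_duplicate_sections_py strip_duplicate_sections_py strip_duplicate_sections_py_alt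
  rw [strip_fold_char]
  simp
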